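-- pv_equiv track=rewrite | github.com/bencsci/TestyHub | Stack/113-reverse-some-chars/reverse-some-chars.py | reverse_some_chars
-- ===== SOURCE A (Python) =====
-- def reverse_some_chars(s, chars):
--   stack = []
--   ans = ""
--
--   for c in s:
--     if c in chars:
--       stack.append(c)
--
--   for c in s:
--     if c in chars:
--       rev = stack.pop()
--       ans += rev
--     else:
--       ans +=c
--
--   return ans
-- ===== SOURCE B (Python) =====
-- def reverse_some_chars(s, chars):
--     cs = set(chars)
--     L = list(s)
--     idx = [i for i, c in enumerate(L) if c in cs]
--     lo, hi = 0, len(idx) - 1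
--     while lo < hi:
--         L[idx[lo]], L[idx[hi]] = L[idx[hi]], L[idx[lo]]
--         lo += 1
--         hi -= 1
--     return ''.join(L)
-- ===== Notes on version B (the rewrite author's own statement) =====
-- stated objective: alternative
-- what changed: Replaces A's stack-push-then-pop-and-rebuild two passes with one index-collection pass (set membership) followed by a two-pointer in-place swap over the selected indices, joining the mutated char list once at the end.
import Mathlib
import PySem

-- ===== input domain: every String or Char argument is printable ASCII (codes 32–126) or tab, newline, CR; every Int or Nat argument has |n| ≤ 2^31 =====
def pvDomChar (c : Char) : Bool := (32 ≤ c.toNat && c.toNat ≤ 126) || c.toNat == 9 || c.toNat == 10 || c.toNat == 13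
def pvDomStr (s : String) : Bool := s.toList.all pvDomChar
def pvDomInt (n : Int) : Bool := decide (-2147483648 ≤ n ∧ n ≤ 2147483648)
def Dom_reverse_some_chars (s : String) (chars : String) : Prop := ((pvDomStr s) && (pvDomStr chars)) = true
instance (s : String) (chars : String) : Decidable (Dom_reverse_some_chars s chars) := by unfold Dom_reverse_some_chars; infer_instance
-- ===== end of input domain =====

-- B replaces A's stack-push/pop-and-rebuild two passes with a set-based index collection and a two-pointer in-place swap over the selected indices (alternative structure).


-- ===== PORT A =====
-- literal transliteration: first pass pushes selected chars on a stack, second pass pops (from the end)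
-- at each selected char and rebuilds the string.  The 'none' branch of the pop is Python's IndexError
-- case; it is unreachable (the stack holds exactly the selected chars) so A is total.
def reverse_some_chars (s : String) (chars : String) : String :=
  let stack := s.toList.foldl
    (fun st c => if PySem.Chars.isIn [c] chars.toList then st ++ [c] else st) []
  let fin := s.toList.foldl
    (fun (acc : List Char × List Char) c =>
      if PySem.Chars.isIn [c] chars.toList then
        match acc.1.getLast? with
        | some rev => (acc.1.dropLast, acc.2 ++ [rev])
        | none => (acc.1, acc.2)   -- Python IndexError; unreachable
      else (acc.1, acc.2 ++ [c]))
    (stack, [])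
  String.ofList fin.2

-- ===== PORT B =====
-- while lo < hi: L[idx[lo]], L[idx[hi]] = L[idx[hi]], L[idx[lo]]; lo += 1; hi -= 1
def swapLoopB (idx : List Int) (L : List Char) (lo hi : Int) : List Char :=
  if h : lo < hi then
    let a := PySem.List.pyGetD idx lo 0
    let b := PySem.List.pyGetD idx hi 0
    let vb := PySem.List.pyGetD L b ' '
    let va := PySem.List.pyGetD L a ' '
    swapLoopB idx (PySem.List.pySetD (PySem.List.pySetD L a vb) b va) (lo + 1) (hi - 1)
  else L
termination_by (hi - lo).toNat
decreasing_by omega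

def reverse_some_chars_alt (s : String) (chars : String) : String :=
  let cs : PySem.Set Char := PySem.Set.ofList chars.toList
  let L := s.toList
  let idx := ((PySem.List.enumerate L).filter (fun p => PySem.Set.contains cs p.2)).map (fun p => p.1)
  let L2 := swapLoopB idx L 0 (PySem.List.len idx - 1)
  PySem.Str.join "" (L2.map (fun c => String.ofList [c]))

-- ===== PRECONDITION & SPEC =====
def Spec_reverse_some_chars (s : String) (chars : String) (out : String) : Prop := out = reverse_some_chars_alt s chars
instance (s : String) (chars : String) (out : String) : Decidable (Spec_reverse_some_chars s chars out) := by unfold Spec_reverse_some_chars; infer_instance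

-- ===== CLAIM (what is proved, stated in full; the proofs are below) =====
def Claim_equal_reverse_some_chars : Prop := ∀ (s : String) (chars : String), Dom_reverse_some_chars s chars → Spec_reverse_some_chars s chars (reverse_some_chars s chars)

-- ===== LEMMAS AND PROOFS =====

-- the common normal form: walk l, at each char selected by p consume the next char of r
def inject (p : Char → Bool) : List Char → List Char → List Char
  | [], _ => []
  | c :: t, r =>
    if p c then
      match r with
      | y :: r' => y :: inject p t r'
      | [] => inject p t []
    else c :: inject p t r

-- the positions of the selected chars
def selIdx (p : Char → Bool) : List Char → List Nat
  | [] => []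
  | c :: t => if p c then 0 :: (selIdx p t).map (· + 1) else (selIdx p t).map (· + 1)

-- sequentially overwrite positions is of L with the chars of r
def place : List Char → List Nat → List Char → List Char
  | L, i :: is, y :: r => place (L.set i y) is r
  | L, _, _ => L

-- membership tests of both ports reduce to list membership
theorem isIn_single (c : Char) (l : List Char) :
    PySem.Chars.isIn [c] l = decide (c ∈ l) := by
  by_cases h : c ∈ l
  · simp only [h, decide_true]
    rw [PySem.Chars.isIn_iff_infix]
    obtain ⟨u, v, rfl⟩ := List.append_of_mem h
    exact ⟨u, v, by simp⟩
  · simp only [h, decide_false]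
    rw [Bool.eq_false_iff]
    intro hc
    rw [PySem.Chars.isIn_iff_infix] at hc
    exact h (hc.subset (by simp))

theorem setContains_ofList (c : Char) (l : List Char) :
    PySem.Set.contains (PySem.Set.ofList l) c = decide (c ∈ l) := by
  by_cases h : c ∈ l
  · simp [PySem.Set.mem_ofList, h]
  · simp [PySem.Set.mem_ofList, h]

-- ----- A side -----
theorem foldl_push_filter (p : Char → Bool) (l init : List Char) :
    l.foldl (fun st c => if p c then st ++ [c] else st) init = init ++ l.filter p := by
  induction l generalizing init with
  | nil => simp
  | cons c t ih =>
    rw [List.foldl_cons, List.filter_cons]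
    cases hp : p c
    · simp only [Bool.false_eq_true, if_false, ih]
    · simp only [if_true, ih]
      simp [List.append_assoc]

theorem foldl_pop_inject (p : Char → Bool) (l : List Char) (r acc : List Char) :
    (l.foldl
      (fun (a : List Char × List Char) c =>
        if p c then
          match a.1.getLast? with
          | some rev => (a.1.dropLast, a.2 ++ [rev])
          | none => (a.1, a.2)
        else (a.1, a.2 ++ [c]))
      (r.reverse, acc)).2 = acc ++ inject p l r := by
  induction l generalizing r acc with
  | nil => simp [inject]
  | cons c t ih =>
    rw [List.foldl_cons]
    cases hp : p c
    · rw [if_neg (by simp [hp])]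
      rw [ih r (acc ++ [c])]
      simp [inject, hp]
    · rw [if_pos (by simp [hp])]
      cases r with
      | nil => simpa [inject, hp] using ih [] acc
      | cons y r' =>
        have h1 : (y :: r').reverse.getLast? = some y := by simp
        have h2 : (y :: r').reverse.dropLast = r'.reverse := by simp
        simp only [h1, h2]
        rw [ih r' (acc ++ [y])]
        simp [inject, hp]

theorem portA_inject (s chars : String) :
    reverse_some_chars s chars
      = String.ofList (inject (fun c => decide (c ∈ chars.toList)) s.toList
          ((s.toList.filter (fun c => decide (c ∈ chars.toList))).reverse)) := by
  unfold reverse_some_chars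
  simp only [isIn_single]
  rw [foldl_push_filter]
  rw [show (([] : List Char) ++ s.toList.filter (fun c => decide (c ∈ chars.toList)))
        = ((s.toList.filter (fun c => decide (c ∈ chars.toList))).reverse).reverse by simp]
  rw [foldl_pop_inject]
  simp

-- ----- bridge: inject = place at the selected indices -----
theorem place_cons_shift (t : List Char) (a : Char) (is : List Nat) (r : List Char) :
    place (a :: t) (is.map (· + 1)) r = a :: place t is r := by
  induction is generalizing t r a with
  | nil => cases r <;> simp [place]
  | cons i is ih =>
    cases r with
    | nil => simp [place]
    | cons y r => simp [place, List.set_cons_succ, ih]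

theorem inject_eq_place (p : Char → Bool) (l r : List Char)
    (h : (l.filter p).length ≤ r.length) :
    inject p l r = place l (selIdx p l) r := by
  induction l generalizing r with
  | nil => simp [inject, selIdx, place]
  | cons c t ih =>
    cases hp : p c
    · rw [List.filter_cons, if_neg (by simp [hp])] at h
      simp only [inject, hp, Bool.false_eq_true, if_false, selIdx, place_cons_shift, ih r h]
    · cases r with
      | nil =>
        exfalso
        rw [List.filter_cons, if_pos (by simp [hp])] at h
        simp at h
      | cons y r' =>
        rw [List.filter_cons, if_pos (by simp [hp]), List.length_cons, List.length_cons,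
          Nat.add_le_add_iff_right] at h
        simp only [inject, hp, if_true, selIdx, place, List.set_cons_zero,
          place_cons_shift, ih r' h]

-- ----- selIdx facts -----
theorem selIdx_pairwise (p : Char → Bool) (l : List Char) : (selIdx p l).Pairwise (· < ·) := by
  induction l with
  | nil => simp [selIdx]
  | cons c t ih =>
    have hm : ((selIdx p t).map (· + 1)).Pairwise (· < ·) := by
      refine List.pairwise_map.2 (ih.imp ?_)
      omega
    cases hp : p c
    · simpa [selIdx, hp] using hm
    · simp only [selIdx, hp, if_true]
      refine List.pairwise_cons.2 ⟨?_, hm⟩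
      intro x hx
      rcases List.mem_map.1 hx with ⟨n, _, rfl⟩
      omega

theorem selIdx_bounds (p : Char → Bool) (l : List Char) : ∀ i ∈ selIdx p l, i < l.length := by
  induction l with
  | nil => simp [selIdx]
  | cons c t ih =>
    intro i hi
    rw [selIdx] at hi
    cases hp : p c <;>
      simp only [hp, Bool.false_eq_true, if_false, if_true, List.mem_cons, List.mem_map] at hi
    · rcases hi with ⟨n, hn, rfl⟩
      have := ih n hn; simp; omega
    · rcases hi with rfl | ⟨n, hn, rfl⟩
      · simp
      · have := ih n hn; simp; omega

theorem selIdx_length (p : Char → Bool) (l : List Char) :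
    (selIdx p l).length = (l.filter p).length := by
  induction l with
  | nil => simp [selIdx]
  | cons c t ih =>
    cases hp : p c
    · rw [selIdx, List.filter_cons, if_neg (by simp [hp])]
      simpa [hp] using ih
    · rw [selIdx, List.filter_cons, if_pos (by simp [hp])]
      simpa [hp] using congrArg Nat.succ ih

theorem selIdx_map_getD (p : Char → Bool) (l : List Char) :
    (selIdx p l).map (fun i => l.getD i ' ') = l.filter p := by
  induction l with
  | nil => simp [selIdx]
  | cons c t ih =>
    have hmap : ∀ (a : Char),
        ((selIdx p t).map (· + 1)).map (fun i => (a :: t).getD i ' ')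
          = (selIdx p t).map (fun i => t.getD i ' ') := by
      intro a
      rw [List.map_map]
      rfl
    cases hp : p c
    · rw [selIdx, List.filter_cons, if_neg (by simp [hp])]
      simpa [hp] using (hmap c).trans ih
    · rw [selIdx, List.filter_cons, if_pos (by simp [hp])]
      simp only [hp, if_true, List.map_cons, List.getD_cons_zero]
      rw [hmap c, ih]

theorem enumFilter_selIdx (p : Char → Bool) (l : List Char) (t : Int) :
    ((PySem.List.enumerate l t).filter (fun q => p q.2)).map (fun q => q.1)
      = (selIdx p l).map (fun n : Nat => t + (n : Int)) := by
  induction l generalizing t with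
  | nil => simp [selIdx, PySem.List.enumerate_nil]
  | cons c l ih =>
    rw [PySem.List.enumerate_cons, List.filter_cons]
    cases hp : p c
    · rw [if_neg (by simp [hp]), selIdx]
      rw [ih (t + 1)]
      simp only [hp, Bool.false_eq_true, if_false, List.map_map]
      refine List.map_congr_left ?_
      intro n _
      simp only [Function.comp_apply]
      omega
    · rw [if_pos (by simp [hp]), selIdx]
      simp only [hp, if_true, List.map_cons]
      rw [ih (t + 1)]
      simp only [List.map_map]
      refine congrArg₂ _ (by omega) (List.map_congr_left ?_)
      intro n _
      simp only [Function.comp_apply]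
      omega

-- ----- place facts -----
theorem place_append (L : List Char) (is : List Nat) (r : List Char) (j : Nat) (z : Char)
    (h : is.length = r.length) :
    place L (is ++ [j]) (r ++ [z]) = (place L is r).set j z := by
  induction is generalizing L r with
  | nil =>
    cases r with
    | nil => simp [place]
    | cons y r => simp at h
  | cons i is ih =>
    cases r with
    | nil => simp at h
    | cons y r =>
      simp only [List.length_cons, Nat.add_right_cancel_iff] at h
      simp [place, ih _ _ h]

theorem set_place_comm (L : List Char) (is : List Nat) (r : List Char) (j : Nat) (z : Char)
    (h : j ∉ is) :
    (place L is r).set j z = place (L.set j z) is r := by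
  induction is generalizing L r with
  | nil => simp [place]
  | cons i is ih =>
    cases r with
    | nil => simp [place]
    | cons y r =>
      have hji : j ≠ i := by simp at h; tauto
      have hj : j ∉ is := by simp at h; tauto
      simp only [place, ih _ _ hj, List.set_comm _ _ hji.symm]

theorem inject_nil_of_filter_nil (p : Char → Bool) (l : List Char)
    (h : l.filter p = []) : inject p l [] = l := by
  induction l with
  | nil => simp [inject]
  | cons c t ih =>
    rw [List.filter_cons] at h
    cases hp : p c
    · rw [hp] at h
      simp only [Bool.false_eq_true, if_false] at h
      simp [inject, hp, ih h]
    · rw [hp] at h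
      simp at h

theorem join_singletons (X : List Char) :
    PySem.Str.join "" (X.map (fun c => String.ofList [c])) = String.ofList X := by
  show String.ofList (PySem.Chars.join "".toList ((X.map (fun c => String.ofList [c])).map String.toList)) = String.ofList X
  congr 1
  rw [List.map_map]
  have : (String.toList ∘ fun c => String.ofList [c]) = fun c => [c] := by
    funext c
    simp
  rw [this]
  have : ("" : String).toList = [] := rfl
  rw [this, PySem.Chars.join_nil_singletons]

-- ----- the swap loop realises place with the reversed selected values -----
theorem swapLoopB_place (d : Nat) (J : List Nat) (L : List Char) (a b : Nat)
    (hd : b + 1 - a = d)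
    (hb : b < J.length)
    (hL : ∀ i ∈ J, i < L.length)
    (hp : J.Pairwise (· < ·)) :
    swapLoopB (J.map (fun n : Nat => (n : Int))) L (a : Int) (b : Int)
      = place L ((J.drop a).take (b + 1 - a))
          ((((J.drop a).take (b + 1 - a)).map (fun i => L.getD i ' ')).reverse) := by
  induction d using Nat.strong_induction_on generalizing L a b with
  | _ d ih =>
  subst hd
  by_cases hab : a < b
  · have ha : a < J.length := lt_trans hab hb
    obtain ⟨m, rfl⟩ : ∃ m, b = a + m + 1 := ⟨b - a - 1, by omega⟩
    have hm : m ≤ J.length - (a + 1) := by omega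
    set i := J[a] with hi
    set j := J[a + m + 1] with hj
    have hij : i < j := List.pairwise_iff_getElem.1 hp a (a + m + 1) ha hb (by omega)
    -- the segment decomposes as i :: mid ++ [j]
    set mid := (J.drop (a + 1)).take m with hmid
    have hmidlen : mid.length = m := by
      simp [hmid, List.length_take, List.length_drop]
      omega
    have hmem : ∀ x ∈ mid, i < x ∧ x < j := by
      intro x hx
      rcases List.mem_iff_getElem.1 hx with ⟨k, hk, rfl⟩
      have hk' : k < m := by omega
      have e : mid[k] = J[a + 1 + k]'(by omega) := by
        simp [hmid, List.getElem_take, List.getElem_drop]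
      rw [e]
      exact ⟨List.pairwise_iff_getElem.1 hp a (a + 1 + k) ha (by omega) (by omega),
            List.pairwise_iff_getElem.1 hp (a + 1 + k) (a + m + 1) (by omega) hb (by omega)⟩
    have hseg : (J.drop a).take (a + m + 1 + 1 - a) = i :: mid ++ [j] := by
      rw [List.drop_eq_getElem_cons ha, show a + m + 1 + 1 - a = (m + 1) + 1 by omega,
        List.take_succ_cons]
      rw [List.take_add_one, hmid]
      have : (J.drop (a + 1))[m]? = some j := by
        rw [List.getElem?_drop, show a + 1 + m = a + m + 1 by omega, hj]
        exact List.getElem?_eq_getElem hb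
      rw [this]
      simp [hi]
    -- unfold one step of the loop
    rw [swapLoopB]
    have hlt : (a : Int) < ((a + m + 1 : Nat) : Int) := by push_cast; omega
    rw [dif_pos hlt]
    have hgi : PySem.List.pyGetD (J.map (fun n : Nat => (n : Int))) (a : Int) 0 = (i : Int) := by
      rw [PySem.List.pyGetD_natCast, List.getD_eq_getElem?_getD, List.getElem?_map,
        List.getElem?_eq_getElem ha]
      simp [hi]
    have hgj : PySem.List.pyGetD (J.map (fun n : Nat => (n : Int)))
        ((a + m + 1 : Nat) : Int) 0 = (j : Int) := by
      rw [PySem.List.pyGetD_natCast, List.getD_eq_getElem?_getD, List.getElem?_map,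
        List.getElem?_eq_getElem hb]
      simp [hj]
    rw [hgi, hgj]
    simp only [PySem.List.pyGetD_natCast, PySem.List.pySetD_natCast]
    set va := L.getD i ' ' with hva
    set vb := L.getD j ' ' with hvb
    set L' := (L.set i vb).set j va with hL'
    have hstep : ((a : Int) + 1) = ((a + 1 : Nat) : Int) := by push_cast; ring
    have hstep' : (((a + m + 1 : Nat) : Int) - 1) = ((a + m : Nat) : Int) := by
      push_cast; ring
    rw [hstep, hstep']
    have hL'len : L'.length = L.length := by simp [hL']
    have ihap : swapLoopB (J.map (fun n : Nat => (n : Int))) L' ((a + 1 : Nat) : Int)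
        ((a + m : Nat) : Int)
        = place L' ((J.drop (a + 1)).take (a + m + 1 - (a + 1)))
          ((((J.drop (a + 1)).take (a + m + 1 - (a + 1))).map
            (fun x => L'.getD x ' ')).reverse) := by
      refine ih (a + m + 1 - (a + 1)) (by omega) L' (a + 1) (a + m) rfl (by omega) ?_
      intro x hx
      rw [hL'len]
      exact hL x hx
    have hmid' : (J.drop (a + 1)).take (a + m + 1 - (a + 1)) = mid := by
      rw [hmid, show a + m + 1 - (a + 1) = m by omega]
    rw [hmid'] at ihap
    rw [ihap, hseg]
    -- values of L' on mid agree with L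
    have hmapeq : mid.map (fun x => L'.getD x ' ') = mid.map (fun x => L.getD x ' ') := by
      refine List.map_congr_left ?_
      intro x hx
      have hxi : x ≠ i := by have := hmem x hx; omega
      have hxj : x ≠ j := by have := hmem x hx; omega
      simp [hL', List.getD_eq_getElem?_getD, List.getElem?_set_ne (Ne.symm hxj),
        List.getElem?_set_ne (Ne.symm hxi)]
    rw [hmapeq]
    -- now fold the swap into place
    have hvals : (((i :: mid ++ [j]).map (fun x => L.getD x ' ')).reverse)
        = vb :: ((mid.map (fun x => L.getD x ' ')).reverse ++ [va]) := by
      simp [hva, hvb]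
    rw [hvals]
    show place L' mid ((mid.map fun x => L.getD x ' ').reverse)
        = place L (i :: (mid ++ [j])) (vb :: ((mid.map fun x => L.getD x ' ').reverse ++ [va]))
    rw [show place L (i :: (mid ++ [j])) (vb :: ((mid.map fun x => L.getD x ' ').reverse ++ [va]))
          = place (L.set i vb) (mid ++ [j]) ((mid.map fun x => L.getD x ' ').reverse ++ [va])
        from rfl]
    rw [place_append _ _ _ _ _ (by simp [hmidlen])]
    rw [set_place_comm _ _ _ _ _ (by intro hmm; have := hmem j hmm; omega)]
  · -- loop does not run
    rw [swapLoopB, dif_neg (by exact_mod_cast hab)]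
    rcases Nat.lt_or_ge b a with hba | hba
    · rw [show b + 1 - a = 0 by omega]
      simp [place]
    · have hba' : a = b := by omega
      subst hba'
      have haJ : a < J.length := hb
      have haL : J[a] < L.length := hL _ (List.getElem_mem haJ)
      rw [show a + 1 - a = 1 by omega, List.drop_eq_getElem_cons haJ]
      rw [show (1 : Nat) = 0 + 1 from rfl, List.take_succ_cons, List.take_zero]
      show L = place L [J[a]] [L.getD J[a] ' ']
      show L = place (L.set J[a] (L.getD J[a] ' ')) [] []
      rw [show place (L.set J[a] (L.getD J[a] ' ')) [] [] = L.set J[a] (L.getD J[a] ' ')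
          from rfl]
      rw [List.getD_eq_getElem _ _ haL, List.set_getElem_self]

theorem portB_inject (s chars : String) :
    reverse_some_chars_alt s chars
      = String.ofList (inject (fun c => decide (c ∈ chars.toList)) s.toList
          ((s.toList.filter (fun c => decide (c ∈ chars.toList))).reverse)) := by
  unfold reverse_some_chars_alt
  simp only [setContains_ofList]
  set p : Char → Bool := fun c => decide (c ∈ chars.toList) with hpdef
  set L := s.toList with hLdef
  have hidx : ((PySem.List.enumerate L).filter (fun q => p q.2)).map (fun q => q.1)
      = (selIdx p L).map (fun n : Nat => (n : Int)) := by
    rw [enumFilter_selIdx]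
    exact List.map_congr_left (by intro n _; omega)
  rw [hidx]
  set J := selIdx p L with hJdef
  have hlen : (PySem.List.len (J.map (fun n : Nat => (n : Int)))) = (J.length : Int) := by
    simp [PySem.List.len_eq]
  rw [hlen]
  rcases Nat.eq_zero_or_pos J.length with hn | hn
  · have hJnil : J = [] := List.length_eq_zero_iff.1 hn
    have hfil : L.filter p = [] := by
      refine List.length_eq_zero_iff.1 ?_
      rw [← selIdx_length p L]
      exact hn
    rw [hJnil]
    rw [swapLoopB, dif_neg (by norm_num)]
    rw [hfil, List.reverse_nil, inject_nil_of_filter_nil p L hfil, join_singletons]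
  · have hcast : (J.length : Int) - 1 = ((J.length - 1 : Nat) : Int) := by
      push_cast [hn]; omega
    rw [hcast]
    have hsw := swapLoopB_place (J.length - 1 + 1 - 0) J L 0 (J.length - 1) rfl (by omega)
      (selIdx_bounds p L) (selIdx_pairwise p L)
    rw [Nat.cast_zero] at hsw
    rw [hsw]
    rw [show J.length - 1 + 1 - 0 = J.length by omega, List.drop_zero, List.take_length]
    rw [selIdx_map_getD]
    rw [← inject_eq_place p L (L.filter p).reverse (by simp)]
    rw [join_singletons]

-- ===== VERDICT (by name: the statement is the Claim_ definition above) =====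
theorem reverse_some_chars_spec : Claim_equal_reverse_some_chars := by
  intro s chars _
  unfold Spec_reverse_some_chars
  rw [portA_inject, portB_inject]
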